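-- pv_equiv track=rewrite | github.com/konradvonkirchbach/custom_miniVite | utils.py | getCartDims
-- ===== SOURCE A (Python) =====
-- import math
--
-- def getPrimes(n):
--     primes = []
--     # Print the number of two's that divide n
--     while n % 2 == 0:
--         primes.append(2)
--         n = n / 2
--
--     # n must be odd at this point
--     # so a skip of 2 ( i = i + 2) can be used
--     for i in range(3, int(math.sqrt(n)) + 1, 2):
--         i = int(i)
--         # while i divides n , print i ad divide n
--         while n % i == 0:
--             primes.append(i)
--             n = n / i
--
--     # Condition if n is a prime
--     # number greater than 2
--     if n > 2:
--         primes.append(int(n))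
--
--     return primes
--
-- def getCartDims(p, ndims=2):
--     primes = getPrimes(p)
--     dims = [1 for _ in range(ndims)]
--     for prime in sorted(primes, reverse=True):
--         minimum = min(dims)
--         index = dims.index(minimum)
--         dims[index] *= prime
--     dims.sort(reverse=True)
--     return dims
-- ===== SOURCE B (Python) =====
-- import math
--
-- def getCartDims(p, ndims=2):
--     # Factor p (strip 2s, then odd trial divisors up to the fixed isqrt bound,
--     # then the leftover prime), then keep the dimensions as an ascending sorted
--     # list: multiply the current minimum (the head) by each prime and shift it
--     # back into place, instead of rescanning with min()/index() each round.
--     factors = []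
--     n = p
--     while n % 2 == 0:
--         factors.append(2)
--         n //= 2
--     for i in range(3, math.isqrt(n) + 1, 2):
--         while n % i == 0:
--             factors.append(i)
--             n //= i
--     if n > 2:
--         factors.append(n)
--     dims = [1] * ndims
--     for prime in sorted(factors, reverse=True):
--         x = dims[0] * prime
--         j = 1
--         while j < len(dims) and dims[j] < x:
--             dims[j - 1] = dims[j]
--             j += 1
--         dims[j - 1] = x
--     dims.reverse()
--     return dims
-- ===== Notes on version B (the rewrite author's own statement) =====
-- stated objective: alternative
-- what changed: B keeps the dimensions as an ascending sorted list and multiplies the head (the running minimum) back into place with an insertion shift, instead of rescanning the list with min() and .index() every round; factoring is inlined with integer division and math.isqrt.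
import Mathlib
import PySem

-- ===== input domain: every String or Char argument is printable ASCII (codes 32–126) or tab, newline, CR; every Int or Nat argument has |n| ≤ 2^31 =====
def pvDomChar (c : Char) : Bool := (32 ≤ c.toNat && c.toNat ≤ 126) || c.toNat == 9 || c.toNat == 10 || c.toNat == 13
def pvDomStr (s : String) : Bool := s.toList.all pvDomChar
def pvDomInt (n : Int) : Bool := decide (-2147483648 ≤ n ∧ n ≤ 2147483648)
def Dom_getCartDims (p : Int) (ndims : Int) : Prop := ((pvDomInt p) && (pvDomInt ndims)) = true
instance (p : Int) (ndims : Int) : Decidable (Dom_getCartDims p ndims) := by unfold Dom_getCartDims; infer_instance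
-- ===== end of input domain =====

-- B keeps the dimensions as an ascending sorted list and multiplies the head (the
-- running minimum) back into place with an insertion shift, instead of rescanning
-- with min()/.index() each round (alternative structure, no speed claim).

-- ===== PORT A =====

-- while n % 2 == 0: primes.append(2); n = n / 2   (division exact: only taken when 2 | n;
-- fuel bounds the halvings — n.natAbs + 1 suffices for every n ≥ 1, i.e. on Pre_)
def pvStrip2A : Nat → Int → List Int × Int
  | 0, n => ([], n)
  | fuel+1, n =>
    if PySem.Int.mod n 2 = 0 then
      let r := pvStrip2A fuel (PySem.Int.floordiv n 2)
      (2 :: r.1, r.2)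
    else ([], n)

-- while n % i == 0: primes.append(i); n = n / i   (same fuel discipline)
def pvStripA : Nat → Int → Int → List Int × Int
  | 0, _, n => ([], n)
  | fuel+1, i, n =>
    if PySem.Int.mod n i = 0 then
      let r := pvStripA fuel i (PySem.Int.floordiv n i)
      (i :: r.1, r.2)
    else ([], n)

def getPrimesA (n : Int) : List Int :=
  let r1 := pvStrip2A (n.natAbs + 1) n
  -- int(math.sqrt(n)) ported by hand as Nat.sqrt: exact for 0 ≤ n ≤ 2^31 (all of Dom ∩ Pre_;
  -- for n < 0 Python raises ValueError, outside Pre_)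
  let bound : Int := (Nat.sqrt r1.2.toNat : Int) + 1
  let r2 := (PySem.List.pyRange 3 bound 2).foldl
    (fun st i =>
      let r := pvStripA (st.2.natAbs + 1) i st.2
      (st.1 ++ r.1, r.2)) r1
  if r2.2 > 2 then r2.1 ++ [r2.2] else r2.1

-- loop body: minimum = min(dims); index = dims.index(minimum); dims[index] *= prime
-- (min([]) raises ValueError in Python — outside Pre_; the port leaves dims unchanged there)
def pvStepA (dims : List Int) (prime : Int) : List Int :=
  match PySem.List.min? dims (fun x => x) with
  | none => dims
  | some m =>
    match PySem.List.index? dims m with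
    | none => dims
    | some idx => dims.set idx (dims.getD idx 0 * prime)

def getCartDims (p : Int) (ndims : Int) : List Int :=
  let primes := getPrimesA p
  let dims : List Int := (PySem.List.pyRange 0 ndims 1).map (fun _ => 1)
  let dims := (PySem.List.sorted primes (fun x => x) true).foldl pvStepA dims
  PySem.List.sorted dims (fun x => x) true

-- ===== PORT B =====

-- Source B: while n % 2 == 0: factors.append(2); n //= 2
def pvStrip2B : Nat → Int → List Int × Int
  | 0, n => ([], n)
  | fuel+1, n =>
    if PySem.Int.mod n 2 = 0 then
      let r := pvStrip2B fuel (PySem.Int.floordiv n 2)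
      (2 :: r.1, r.2)
    else ([], n)

-- Source B: while n % i == 0: factors.append(i); n //= i
def pvStripB : Nat → Int → Int → List Int × Int
  | 0, _, n => ([], n)
  | fuel+1, i, n =>
    if PySem.Int.mod n i = 0 then
      let r := pvStripB fuel i (PySem.Int.floordiv n i)
      (i :: r.1, r.2)
    else ([], n)

-- Source B's inner shift loop: move x right past every smaller element, drop it at j-1
def pvInsertAsc (x : Int) : List Int → List Int
  | [] => [x]
  | y :: ys => if y < x then y :: pvInsertAsc x ys else x :: y :: ys

-- Source B loop body: x = dims[0] * prime; shift; (dims[0] on [] raises IndexError — outside Pre_)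
def pvStepB (dims : List Int) (prime : Int) : List Int :=
  match dims with
  | [] => []
  | x :: rest => pvInsertAsc (x * prime) rest

def getCartDims_alt (p : Int) (ndims : Int) : List Int :=
  let r1 := pvStrip2B (p.natAbs + 1) p
  -- math.isqrt(n) = Nat.sqrt (raises ValueError for n < 0, outside Pre_)
  let bound : Int := (Nat.sqrt r1.2.toNat : Int) + 1
  let r2 := (PySem.List.pyRange 3 bound 2).foldl
    (fun st i =>
      let r := pvStripB (st.2.natAbs + 1) i st.2
      (st.1 ++ r.1, r.2)) r1
  let factors := if r2.2 > 2 then r2.1 ++ [r2.2] else r2.1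
  let dims : List Int := List.replicate ndims.toNat 1
  let dims := (PySem.List.sorted factors (fun x => x) true).foldl pvStepB dims
  dims.reverse

-- ===== PRECONDITION & SPEC =====
-- Pre_ excludes exactly the inputs where Python A does not return: p ≤ 0 (the 2-stripping
-- loop runs forever on p = 0; math.sqrt raises ValueError on the negative remainder for
-- p < 0) and ndims ≤ 0 with p ≥ 2 (min([]) raises ValueError).
def Pre_getCartDims (p : Int) (ndims : Int) : Prop := 1 ≤ p ∧ (1 ≤ ndims ∨ p = 1)
instance (p : Int) (ndims : Int) : Decidable (Pre_getCartDims p ndims) := by unfold Pre_getCartDims; infer_instance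
def pvWitness_getCartDims : Int × Int := (12, 2)

def Spec_getCartDims (p : Int) (ndims : Int) (out : List Int) : Prop := out = getCartDims_alt p ndims
instance (p : Int) (ndims : Int) (out : List Int) : Decidable (Spec_getCartDims p ndims out) := by unfold Spec_getCartDims; infer_instance

-- ===== CLAIM (what is proved, stated in full; the proofs are below) =====
def Claim_equal_getCartDims : Prop := ∀ (p : Int) (ndims : Int), Dom_getCartDims p ndims → Pre_getCartDims p ndims → Spec_getCartDims p ndims (getCartDims p ndims)

-- ===== LEMMAS AND PROOFS =====
theorem pvStrip2_eq : pvStrip2B = pvStrip2A := by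
  funext fuel n
  induction fuel generalizing n with
  | zero => rfl
  | succ k ih => simp [pvStrip2A, pvStrip2B, ih]

theorem pvStrip_eq : pvStripB = pvStripA := by
  funext fuel i n
  induction fuel generalizing n with
  | zero => rfl
  | succ k ih => simp [pvStripA, pvStripB, ih]

theorem pvInsertAsc_eq_orderedInsert (x : Int) (l : List Int) :
    pvInsertAsc x l = List.orderedInsert (· ≤ ·) x l := by
  induction l with
  | nil => rfl
  | cons y ys ih =>
    by_cases h : y < x
    · simp [pvInsertAsc, List.orderedInsert, h, not_le.mpr h, ih]
    · simp [pvInsertAsc, List.orderedInsert, h, not_lt.mp h]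

-- the loop invariant: B's list stays a sorted rearrangement of A's list, and one
-- step multiplies the same minimum value by the same prime on both sides
theorem pvStep_inv (A B : List Int) (q : Int)
    (hperm : B.Perm A) (hsort : B.Pairwise (· ≤ ·)) :
    (pvStepB B q).Perm (pvStepA A q) ∧ (pvStepB B q).Pairwise (· ≤ ·) := by
  match B, hperm, hsort with
  | [], hperm, _ =>
    have hA : A = [] := hperm.nil_eq.symm
    subst hA
    exact ⟨by simp [pvStepA, pvStepB, PySem.List.min?], List.Pairwise.nil⟩
  | x :: rest, hperm, hsort =>
    have hAne : A ≠ [] := by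
      intro h; subst h; exact (List.cons_ne_nil x rest) hperm.eq_nil
    obtain ⟨m, hm⟩ : ∃ m, PySem.List.min? A (fun x => x) = some m := by
      cases hmin : PySem.List.min? A (fun x => x) with
      | none => exact absurd ((PySem.List.min?_eq_none_iff A _).mp hmin) hAne
      | some m => exact ⟨m, rfl⟩
    have hmA : m ∈ A := PySem.List.min?_mem hm
    have hmin : ∀ y ∈ A, m ≤ y := PySem.List.min?_isMin hm
    obtain ⟨idx, hidx⟩ : ∃ idx, PySem.List.index? A m = some idx :=
      Option.isSome_iff_exists.mp ((PySem.List.index?_isSome_iff A m).mpr hmA)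
    obtain ⟨hk, hget, -⟩ := PySem.List.getElem_of_index?_eq_some hidx
    have hxm : x = m := by
      have hxA : x ∈ A := hperm.subset List.mem_cons_self
      have hmB : m ∈ x :: rest := (hperm.mem_iff).mpr hmA
      have hle : ∀ y ∈ rest, x ≤ y := (List.pairwise_cons.mp hsort).1
      rcases List.mem_cons.mp hmB with h | h
      · exact h.symm
      · exact le_antisymm (hle m h) (hmin x hxA)
    subst hxm
    have hstepA : pvStepA A q = A.set idx (x * q) := by
      simp only [pvStepA, hm, hidx, List.getD_eq_getElem A 0 hk, hget]
    have hresB : rest.Perm (A.eraseIdx idx) := by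
      have h1 : A.Perm (x :: A.eraseIdx idx) := by
        simpa [hget] using (List.getElem_cons_eraseIdx_perm hk).symm
      exact List.Perm.cons_inv (hperm.trans h1)
    have hstepB : pvStepB (x :: rest) q = List.orderedInsert (· ≤ ·) (x * q) rest := by
      simp [pvStepB, pvInsertAsc_eq_orderedInsert]
    refine ⟨?_, ?_⟩
    · rw [hstepA, hstepB]
      exact (List.perm_orderedInsert _ _ _).trans ((hresB.cons (x * q)).trans
        (List.set_perm_cons_eraseIdx hk (x * q)).symm)
    · rw [hstepB]
      exact List.Pairwise.orderedInsert _ _ (List.pairwise_cons.mp hsort).2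

theorem pvFold_inv (ps : List Int) (A B : List Int)
    (hperm : B.Perm A) (hsort : B.Pairwise (· ≤ ·)) :
    (ps.foldl pvStepB B).Perm (ps.foldl pvStepA A) ∧ (ps.foldl pvStepB B).Pairwise (· ≤ ·) := by
  induction ps generalizing A B with
  | nil => exact ⟨hperm, hsort⟩
  | cons q qs ih =>
    obtain ⟨h1, h2⟩ := pvStep_inv A B q hperm hsort
    exact ih _ _ h1 h2

-- A's descending sort of the final list equals the reverse of B's ascending sorted list
theorem pvFinal (A B : List Int) (hperm : B.Perm A) (hsort : B.Pairwise (· ≤ ·)) :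
    PySem.List.sorted A (fun x => x) true = B.reverse := by
  have h1 : (PySem.List.sorted A (fun x => x) true).reverse = B := by
    apply PySem.List.eq_of_perm_of_pairwise_le_of_injective (key := fun x => x)
      (fun a b h => h)
    · exact ((List.reverse_perm _).trans (PySem.List.sorted_perm A (fun x => x) true)).trans hperm.symm
    · exact List.pairwise_reverse.mpr (PySem.List.sorted_pairwise_rev A (fun x => x))
    · exact hsort
  rw [← h1, List.reverse_reverse]

theorem pvMain (ps : List Int) (k : Nat) :
    PySem.List.sorted (ps.foldl pvStepA (List.replicate k 1)) (fun x => x) true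
      = (ps.foldl pvStepB (List.replicate k 1)).reverse := by
  obtain ⟨h1, h2⟩ := pvFold_inv ps (List.replicate k 1) (List.replicate k 1)
    (List.Perm.refl _) (List.pairwise_replicate.mpr (Or.inr le_rfl))
  exact pvFinal _ _ h1 h2

-- ===== VERDICT (by name: the statement is the Claim_ definition above) =====
theorem getCartDims_spec : Claim_equal_getCartDims := by
  intro p ndims _ _
  have hinit : ((PySem.List.pyRange 0 ndims 1).map (fun _ => (1 : Int)))
      = List.replicate ndims.toNat 1 := by
    rw [PySem.List.pyRange_one]; simp [Function.comp_def, List.map_const']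
  simp only [Spec_getCartDims, getCartDims, getCartDims_alt, getPrimesA,
    pvStrip2_eq, pvStrip_eq, hinit]
  exact pvMain _ _
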